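-- pv_equiv track=rewrite | github.com/daleysoftware/codeeval | 2-hard/running-for-president/main.py | get_possibilities_of_length_n
-- ===== SOURCE A (Python) =====
-- import copy
--
-- def get_possibilities_of_length_n(n, prefix=None, result=None):
--     if prefix is None: prefix = []
--     if result is None: result = []
--     if len(prefix) == n:
--         result.append(copy.deepcopy(prefix))
--         return
--     get_possibilities_of_length_n(n, prefix + [False], result)
--     get_possibilities_of_length_n(n, prefix + [True], result)
--     return result
-- ===== SOURCE B (Python) =====
-- def get_possibilities_of_length_n(n, prefix=None, result=None):
--     if prefix is None: prefix = []
--     if result is None: result = []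
--     m = n - len(prefix)
--     for i in range(2 ** m):
--         result.append(prefix + [bool((i >> (m - 1 - j)) & 1) for j in range(m)])
--     return result
-- ===== Notes on version B (the rewrite author's own statement) =====
-- stated objective: simpler
-- what changed: Replaces the branching recursion (two recursive calls per level) with a single iterative loop over range(2**m) that builds each length-m suffix directly from the bits of the counter i.
-- outside the precondition, e.g. on get_possibilities_of_length_n(0, None, None): A returns None, B returns [[]]; on get_possibilities_of_length_n(2, [True, False], None): A returns None, B returns [[True, False]]
import Mathlib
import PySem

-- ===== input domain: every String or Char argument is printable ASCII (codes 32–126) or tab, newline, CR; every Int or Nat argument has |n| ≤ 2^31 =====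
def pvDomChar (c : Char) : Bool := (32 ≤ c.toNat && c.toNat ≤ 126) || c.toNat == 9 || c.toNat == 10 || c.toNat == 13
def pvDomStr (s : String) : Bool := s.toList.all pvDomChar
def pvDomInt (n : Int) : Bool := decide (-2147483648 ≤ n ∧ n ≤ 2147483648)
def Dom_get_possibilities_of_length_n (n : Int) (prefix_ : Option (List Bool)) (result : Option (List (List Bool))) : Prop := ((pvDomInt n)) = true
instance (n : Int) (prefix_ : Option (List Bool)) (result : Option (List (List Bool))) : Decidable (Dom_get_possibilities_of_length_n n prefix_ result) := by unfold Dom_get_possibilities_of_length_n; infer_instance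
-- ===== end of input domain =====

-- B replaces A's branching recursion by one loop that reads each sequence off the bits of a
-- counter (objective: simpler). Both A and B append to `result` in place; the equivalence
-- proved here is about the return value.

-- ===== PORT A =====
-- A's recursion descends n - len(prefix) levels; that quantity is the structural fuel.
-- If the fuel runs out with len(prefix) ≠ n (only possible outside Pre_), we return the
-- accumulator (Python diverges / returns None there; Pre_ excludes it).
def pvAuxA (n : Int) (p : List Bool) (r : List (List Bool)) (fuel : Nat) : List (List Bool) :=
  if (p.length : Int) = n then r ++ [p]
  else match fuel with
    | 0 => r
    | fuel + 1 => pvAuxA n (p ++ [true]) (pvAuxA n (p ++ [false]) r fuel) fuel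

def get_possibilities_of_length_n (n : Int) (prefix_ : Option (List Bool)) (result : Option (List (List Bool))) : List (List Bool) :=
  let p := prefix_.getD []
  let r := result.getD []
  pvAuxA n p r (n - p.length).toNat

-- ===== PORT B =====
-- the list comprehension [bool((i >> (m-1-j)) & 1) for j in range(m)]
def pvBits (m i : Nat) : List Bool :=
  (List.range m).map (fun j => (i >>> (m - 1 - j)) &&& 1 == 1)

def get_possibilities_of_length_n_alt (n : Int) (prefix_ : Option (List Bool)) (result : Option (List (List Bool))) : List (List Bool) :=
  let p := prefix_.getD []
  let r := result.getD []
  let m := (n - p.length).toNat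
  r ++ (List.range (2 ^ m)).map (fun i => p ++ pvBits m i)

-- ===== PRECONDITION & SPEC =====
-- Pre_ excludes len(prefix) ≥ n: at len(prefix) == n Python A returns None (no list value of
-- the declared type), and for len(prefix) > n it recurses forever (RecursionError).
def Pre_get_possibilities_of_length_n (n : Int) (prefix_ : Option (List Bool)) (result : Option (List (List Bool))) : Prop :=
  ((prefix_.getD []).length : Int) < n
instance (n : Int) (prefix_ : Option (List Bool)) (result : Option (List (List Bool))) : Decidable (Pre_get_possibilities_of_length_n n prefix_ result) := by unfold Pre_get_possibilities_of_length_n; infer_instance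

def pvWitness_get_possibilities_of_length_n : Int × Option (List Bool) × Option (List (List Bool)) :=
  (3, some [true], some [[false]])

def Spec_get_possibilities_of_length_n (n : Int) (prefix_ : Option (List Bool)) (result : Option (List (List Bool))) (out : List (List Bool)) : Prop := out = get_possibilities_of_length_n_alt n prefix_ result
instance (n : Int) (prefix_ : Option (List Bool)) (result : Option (List (List Bool))) (out : List (List Bool)) : Decidable (Spec_get_possibilities_of_length_n n prefix_ result out) := by unfold Spec_get_possibilities_of_length_n; infer_instance

-- ===== CLAIM (what is proved, stated in full; the proofs are below) =====
def Claim_equal_get_possibilities_of_length_n : Prop := ∀ (n : Int) (prefix_ : Option (List Bool)) (result : Option (List (List Bool))), Dom_get_possibilities_of_length_n n prefix_ result → Pre_get_possibilities_of_length_n n prefix_ result → Spec_get_possibilities_of_length_n n prefix_ result (get_possibilities_of_length_n n prefix_ result)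

-- ===== LEMMAS AND PROOFS =====

-- peel the most significant bit off the suffix
theorem pvBits_succ (m i : Nat) :
    pvBits (m + 1) i = ((i >>> m) &&& 1 == 1) :: pvBits m i := by
  unfold pvBits
  rw [List.range_succ_eq_map]
  simp only [List.map_cons, List.map_map]
  congr 1
  apply List.map_congr_left
  intro a ha
  simp only [Function.comp_apply, Nat.succ_eq_add_one]
  have e : m + 1 - 1 - (a + 1) = m - 1 - a := by omega
  rw [e]

-- adding the 2^m bit does not change the low m bits
theorem pvBits_low (m i : Nat) (hi : i < 2 ^ m) :
    pvBits m (2 ^ m + i) = pvBits m i := by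
  unfold pvBits
  apply List.map_congr_left
  intro j hj
  have hjm : j < m := List.mem_range.mp hj
  have hk : m - 1 - j < m := by omega
  rw [Nat.shiftRight_eq_div_pow, Nat.shiftRight_eq_div_pow,
      Nat.and_one_is_mod, Nat.and_one_is_mod]
  have hsplit : (2 : Nat) ^ m = 2 ^ (m - (m - 1 - j)) * 2 ^ (m - 1 - j) := by
    rw [← pow_add]; congr 1; omega
  have h1 : (2 ^ m + i) / 2 ^ (m - 1 - j) = i / 2 ^ (m - 1 - j) + 2 ^ (m - (m - 1 - j)) := by
    rw [hsplit, Nat.add_comm, Nat.add_mul_div_right _ _ (Nat.two_pow_pos _)]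
  have h2 : (2 : Nat) ∣ 2 ^ (m - (m - 1 - j)) := dvd_pow_self 2 (by omega)
  have h3 : (i / 2 ^ (m - 1 - j) + 2 ^ (m - (m - 1 - j))) % 2 = i / 2 ^ (m - 1 - j) % 2 := by
    omega
  rw [h1, h3]

-- A's recursion computes the accumulator followed by the binary-counting enumeration
theorem pvAuxA_eq (n : Int) (fuel : Nat) :
    ∀ (p : List Bool) (r : List (List Bool)), (p.length : Int) + fuel = n →
      pvAuxA n p r fuel = r ++ (List.range (2 ^ fuel)).map (fun i => p ++ pvBits fuel i) := by
  induction fuel with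
  | zero =>
    intro p r h
    unfold pvAuxA
    rw [if_pos (by omega)]
    simp [pvBits]
  | succ fuel ih =>
    intro p r h
    unfold pvAuxA
    rw [if_neg (by omega)]
    show pvAuxA n (p ++ [true]) (pvAuxA n (p ++ [false]) r fuel) fuel = _
    rw [ih (p ++ [false]) r (by simp; omega),
        ih (p ++ [true]) _ (by simp; omega)]
    rw [List.append_assoc]
    congr 1
    have hsplit : 2 ^ (fuel + 1) = 2 ^ fuel + 2 ^ fuel := by ring
    rw [hsplit, List.range_add, List.map_append, List.map_map]
    congr 1
    · apply List.map_congr_left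
      intro i hi
      have hi' : i < 2 ^ fuel := List.mem_range.mp hi
      have hz : i >>> fuel = 0 := by
        rw [Nat.shiftRight_eq_div_pow]; exact Nat.div_eq_of_lt hi'
      rw [pvBits_succ, hz]
      simp
    · apply List.map_congr_left
      intro i hi
      have hi' : i < 2 ^ fuel := List.mem_range.mp hi
      have hone : (2 ^ fuel + i) >>> fuel = 1 := by
        rw [Nat.shiftRight_eq_div_pow, Nat.add_comm,
            Nat.add_div_right _ (Nat.two_pow_pos fuel), Nat.div_eq_of_lt hi']
      simp only [Function.comp]
      rw [pvBits_succ, hone, pvBits_low fuel i hi']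
      simp

-- ===== VERDICT (by name: the statement is the Claim_ definition above) =====
theorem get_possibilities_of_length_n_spec : Claim_equal_get_possibilities_of_length_n := by
  intro n prefix_ result _ hpre
  unfold Spec_get_possibilities_of_length_n
  unfold get_possibilities_of_length_n get_possibilities_of_length_n_alt
  have hpre' : ((prefix_.getD []).length : Int) < n := hpre
  exact pvAuxA_eq n _ _ _ (by omega)
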